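-- pv_equiv track=rewrite | github.com/DIMFLIX-EDUCATION/transport-problem-solver | transport.py | find_cycle_in_basis
-- ===== SOURCE A (Python) =====
-- from typing import List, Tuple, Optional, Dict, Set
--
-- def find_cycle_in_basis(m: int, n: int, basis: Set[Tuple[int,int]], enter: Tuple[int,int]) -> List[Tuple[int,int]]:
--     # базис — дерево; добавим enter и найдём уникальный цикл
--     # представим вершины как R_i (0..m-1) и C_j (0..n-1)
--     # найдём путь между R_i и C_j в дереве
--     i0, j0 = enter
--     # строим граф на основе basis
--     graph: Dict[str, List[str]] = {}
--     def add_edge(ri: int, cj: int):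
--         rnode = f"R{ri}"
--         cnode = f"C{cj}"
--         graph.setdefault(rnode, []).append(cnode)
--         graph.setdefault(cnode, []).append(rnode)
--     for (i,j) in basis:
--         add_edge(i,j)
--     start = f"R{i0}"
--     target = f"C{j0}"
--     # BFS
--     from collections import deque
--     q = deque([start])
--     prev: Dict[str, Optional[str]] = {start: None}
--     while q:
--         u = q.popleft()
--         if u == target:
--             break
--         for v in graph.get(u, []):
--             if v not in prev:
--                 prev[v] = u
--                 q.append(v)
--     if target not in prev:
--         # если по какой-то причине нет пути (не должно быть), вернуть пусто
--         return []
--     # восстановим путь узлов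
--     nodes_path: List[str] = []
--     cur = target
--     while cur is not None:
--         nodes_path.append(cur)
--         cur = prev[cur]
--     nodes_path.reverse()  # R_i0 ... C_j0
--     # преобразуем в рёбра (клетки)
--     edges: List[Tuple[int,int]] = []
--     for k in range(len(nodes_path)-1):
--         u, v = nodes_path[k], nodes_path[k+1]
--         if u[0] == 'R':
--             i = int(u[1:]); j = int(v[1:])  # u=R, v=C
--         else:
--             i = int(v[1:]); j = int(u[1:])  # u=C, v=R
--         edges.append((i,j))
--     # добавим входящую дугу в начало, чтобы чередовать знаки + - + -
--     cycle = [enter] + edges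
--     return cycle
-- ===== SOURCE B (Python) =====
-- from typing import List, Tuple, Set, Dict
--
-- def find_cycle_in_basis(m: int, n: int, basis: Set[Tuple[int, int]], enter: Tuple[int, int]) -> List[Tuple[int, int]]:
--     i0, j0 = enter
--     graph: Dict[str, List[str]] = {}
--     for (i, j) in basis:
--         r, c = f"R{i}", f"C{j}"
--         graph.setdefault(r, []).append(c)
--         graph.setdefault(c, []).append(r)
--     start, target = f"R{i0}", f"C{j0}"
--     # BFS over whole paths (stored reversed, head = current node): no prev-map,
--     # no reconstruction pass — the answer path is popped ready-made.
--     queue: List[List[str]] = [[start]]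
--     seen = {start}
--     k = 0
--     found = None
--     while k < len(queue):
--         path = queue[k]
--         k += 1
--         if path[0] == target:
--             found = path
--             break
--         for v in graph.get(path[0], []):
--             if v not in seen:
--                 seen.add(v)
--                 queue.append([v] + path)
--     if found is None:
--         return []
--     nodes = found[::-1]  # start ... target
--     cells: List[Tuple[int, int]] = []
--     for u, v in zip(nodes, nodes[1:]):
--         if u[0] == 'R':
--             cells.append((int(u[1:]), int(v[1:])))
--         else:
--             cells.append((int(v[1:]), int(u[1:])))
--     return [enter] + cells
-- ===== Notes on version B (the rewrite author's own statement) =====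
-- stated objective: alternative
-- what changed: Replaces the prev-pointer BFS (deque + prev dict, then a backward reconstruction walk plus a reverse) by a path-carrying BFS: each queue entry is the whole reversed node path, a visited set replaces the prev map, the answer path is popped ready-made, and the final cell mapping pairs consecutive nodes with zip instead of an index loop.
import Mathlib
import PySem

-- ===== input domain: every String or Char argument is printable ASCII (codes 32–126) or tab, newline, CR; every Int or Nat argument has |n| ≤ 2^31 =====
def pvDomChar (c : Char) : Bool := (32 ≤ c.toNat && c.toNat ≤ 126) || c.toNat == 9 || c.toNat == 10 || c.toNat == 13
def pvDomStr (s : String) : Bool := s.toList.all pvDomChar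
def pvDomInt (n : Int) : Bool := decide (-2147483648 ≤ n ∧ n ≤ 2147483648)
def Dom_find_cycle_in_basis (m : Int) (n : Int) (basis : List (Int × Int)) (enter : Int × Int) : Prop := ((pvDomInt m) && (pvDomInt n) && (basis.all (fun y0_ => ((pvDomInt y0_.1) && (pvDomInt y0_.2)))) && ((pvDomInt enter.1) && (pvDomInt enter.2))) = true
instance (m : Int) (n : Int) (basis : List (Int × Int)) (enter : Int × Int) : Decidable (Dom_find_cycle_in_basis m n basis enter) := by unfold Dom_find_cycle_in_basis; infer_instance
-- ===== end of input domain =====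

-- B replaces A's prev-pointer BFS (deque + prev map + backward reconstruction + reverse)
-- by a path-carrying BFS (queue of reversed partial paths + visited set); same return value.

-- nodes f"R{i}" / f"C{j}" as lists of chars (PySem strings are List Char underneath)
abbrev PvNode := List Char
abbrev PvGraph := PySem.Dict PvNode (List PvNode)
abbrev PvPrev := PySem.Dict PvNode (Option PvNode)

def pvNodeR (i : Int) : PvNode := 'R' :: PySem.Int.toChars i
def pvNodeC (j : Int) : PvNode := 'C' :: PySem.Int.toChars j

-- both Pythons build the graph with the identical setdefault/append loop
def pvAddEdge (g : PvGraph) (i j : Int) : PvGraph :=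
  let r := pvNodeR i
  let c := pvNodeC j
  let g1 := g.modify r [] (fun l => l ++ [c])   -- graph.setdefault(r, []).append(c)
  g1.modify c [] (fun l => l ++ [r])            -- graph.setdefault(c, []).append(r)

def pvBuildGraph (basis : List (Int × Int)) : PvGraph :=
  basis.foldl (fun g p => pvAddEdge g p.1 p.2) PySem.Dict.empty

-- int(u[1:]); never fails on the "R<int>"/"C<int>" strings both programs build
def pvParse (u : PvNode) : Int := (PySem.Int.ofChars? (u.drop 1)).getD 0

-- the identical cell computation both Pythons apply to a consecutive node pair
def pvCell (u v : PvNode) : Int × Int :=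
  if u.headD ' ' = 'R' then (pvParse u, pvParse v) else (pvParse v, pvParse u)

-- ===== PORT A =====
-- body of A's inner `for v in graph.get(u, [])` loop
def pvStepA (u : PvNode) (st : List PvNode × PvPrev) (v : PvNode) : List PvNode × PvPrev :=
  if st.2.contains v then st else (st.1 ++ [v], st.2.insert v (some u))

-- A's `while q:` BFS loop; fuel bounds the number of iterations (each node is enqueued once)
def pvBfsA (g : PvGraph) (target : PvNode) : Nat → List PvNode → PvPrev → PvPrev
  | 0, _, prev => prev
  | _ + 1, [], prev => prev
  | fuel + 1, u :: q, prev =>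
    if u = target then prev
    else
      let st := (g.getD u []).foldl (pvStepA u) (q, prev)
      pvBfsA g target fuel st.1 st.2

-- A's `while cur is not None` reconstruction walk (fuel bounds the chain length)
def pvReconA (prev : PvPrev) : Nat → PvNode → List PvNode
  | 0, _ => []
  | fuel + 1, cur =>
    cur :: (match prev.getD cur none with
            | none => []
            | some p => pvReconA prev fuel p)

-- A's `for k in range(len(nodes_path)-1)` loop over consecutive pairs
def pvEdgesA : List PvNode → List (Int × Int)
  | u :: v :: rest => pvCell u v :: pvEdgesA (v :: rest)
  | _ => []

def find_cycle_in_basis (m : Int) (n : Int) (basis : List (Int × Int)) (enter : Int × Int) : List (Int × Int) :=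
  let graph := pvBuildGraph basis
  let start := pvNodeR enter.1
  let target := pvNodeC enter.2
  let fuel := graph.values.flatten.length + 2
  let prev := pvBfsA graph target fuel [start] (PySem.Dict.empty.insert start none)
  if prev.contains target then
    let nodes_path := (pvReconA prev (prev.items.length + 1) target).reverse
    enter :: pvEdgesA nodes_path
  else []

-- ===== PORT B =====
-- body of B's inner `for v in graph.get(path[0], [])` loop (p is the popped path)
def pvStepB (p : List PvNode) (st : List (List PvNode) × PySem.Set PvNode) (v : PvNode) :
    List (List PvNode) × PySem.Set PvNode :=
  if PySem.Set.contains st.2 v then st else (st.1 ++ [v :: p], PySem.Set.add st.2 v)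

-- B's `while k < len(queue)` loop over the queue of reversed partial paths
def pvBfsB (g : PvGraph) (target : PvNode) :
    Nat → List (List PvNode) → PySem.Set PvNode → Option (List PvNode)
  | 0, _, _ => none
  | _ + 1, [], _ => none
  | fuel + 1, p :: rest, seen =>
    let u := p.headD []
    if u = target then some p
    else
      let st := (g.getD u []).foldl (pvStepB p) (rest, seen)
      pvBfsB g target fuel st.1 st.2

def find_cycle_in_basis_alt (m : Int) (n : Int) (basis : List (Int × Int)) (enter : Int × Int) : List (Int × Int) :=
  let graph := pvBuildGraph basis
  let start := pvNodeR enter.1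
  let target := pvNodeC enter.2
  let fuel := graph.values.flatten.length + 2
  match pvBfsB graph target fuel [[start]] (PySem.Set.ofList [start]) with
  | none => []
  | some p =>
    let nodes := p.reverse
    enter :: (nodes.zip (nodes.drop 1)).map (fun q => pvCell q.1 q.2)

-- ===== PRECONDITION & SPEC =====
def Spec_find_cycle_in_basis (m : Int) (n : Int) (basis : List (Int × Int)) (enter : Int × Int) (out : List (Int × Int)) : Prop := out = find_cycle_in_basis_alt m n basis enter
instance (m : Int) (n : Int) (basis : List (Int × Int)) (enter : Int × Int) (out : List (Int × Int)) : Decidable (Spec_find_cycle_in_basis m n basis enter out) := by unfold Spec_find_cycle_in_basis; infer_instance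

-- ===== CLAIM (what is proved, stated in full; the proofs are below) =====
def Claim_equal_find_cycle_in_basis : Prop := ∀ (m : Int) (n : Int) (basis : List (Int × Int)) (enter : Int × Int), Dom_find_cycle_in_basis m n basis enter → Spec_find_cycle_in_basis m n basis enter (find_cycle_in_basis m n basis enter)

-- ===== LEMMAS AND PROOFS =====

-- the parent chain recorded in A's prev map, from u down to the BFS start
inductive PvChain (prev : PvPrev) : PvNode → List PvNode → Prop
  | base (u : PvNode) (h : prev.get? u = some none) : PvChain prev u [u]
  | step (u w : PvNode) (rest : List PvNode) (h : prev.get? u = some (some w))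
      (hc : PvChain prev w rest) : PvChain prev u (u :: rest)

-- prev' keeps every binding of prev
def PvExt (prev prev' : PvPrev) : Prop := ∀ k w, prev.get? k = some w → prev'.get? k = some w

-- number of distinct graph-adjacency nodes not yet recorded in prev
def pvFresh (g : PvGraph) (prev : PvPrev) : Nat :=
  ((PySem.Set.ofList g.values.flatten).filter (fun x => !prev.contains x)).length

theorem pvChain_head (prev : PvPrev) (u : PvNode) (p : List PvNode) (h : PvChain prev u p) :
    ∃ rest, p = u :: rest := by
  cases h with
  | base => exact ⟨[], rfl⟩
  | step _ _ rest => exact ⟨rest, rfl⟩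

theorem pvChain_contains (prev : PvPrev) (u : PvNode) (p : List PvNode) (h : PvChain prev u p) :
    ∀ x ∈ p, prev.contains x = true := by
  induction h with
  | base v hv =>
    intro x hx; simp at hx; subst hx
    rw [PySem.Dict.contains_eq_isSome_get?, hv]; rfl
  | step v w rest hv _ ih =>
    intro x hx
    rcases List.mem_cons.mp hx with h1 | h2
    · subst h1; rw [PySem.Dict.contains_eq_isSome_get?, hv]; rfl
    · exact ih x h2

theorem pvChain_mono (prev prev' : PvPrev) (hext : PvExt prev prev')
    (u : PvNode) (p : List PvNode) (h : PvChain prev u p) : PvChain prev' u p := by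
  induction h with
  | base v hv => exact PvChain.base v (hext _ _ hv)
  | step v w rest hv _ ih => exact PvChain.step v w rest (hext _ _ hv) ih

theorem pvExt_insert_fresh (prev : PvPrev) (v : PvNode) (w : Option PvNode)
    (hv : prev.contains v = false) : PvExt prev (prev.insert v w) := by
  intro k x hk
  have hkv : k ≠ v := by
    intro h; subst h
    rw [PySem.Dict.contains_eq_isSome_get?, hk] at hv; simp at hv
  rw [PySem.Dict.get?_insert_of_ne prev w hkv]; exact hk

theorem pvRecon_of_chain (prev : PvPrev) (u : PvNode) (p : List PvNode)
    (h : PvChain prev u p) : ∀ fuel, p.length ≤ fuel → pvReconA prev fuel u = p := by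
  induction h with
  | base v hv =>
    intro fuel hf
    match fuel, hf with
    | f + 1, _ =>
      simp only [pvReconA, PySem.Dict.getD_eq_get?_getD, hv]; rfl
  | step v w rest hv hc ih =>
    intro fuel hf
    match fuel, hf with
    | f + 1, hf =>
      simp only [pvReconA, PySem.Dict.getD_eq_get?_getD, hv]
      simp only [Option.getD_some]
      have := ih f (by simpa using Nat.lt_succ_iff.mp (by simpa using hf))
      simp [this]

-- pvEdgesA is the zip-with-tail mapping
theorem pvEdgesA_eq_zip (xs : List PvNode) :
    pvEdgesA xs = (xs.zip (xs.drop 1)).map (fun q => pvCell q.1 q.2) := by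
  match xs with
  | [] => rfl
  | [u] => rfl
  | u :: v :: rest =>
    simp only [pvEdgesA, List.drop_succ_cons, List.drop_zero, List.zip_cons_cons, List.map_cons]
    exact congrArg _ (pvEdgesA_eq_zip (v :: rest))

-- ----- properties of A's inner foldl -----

theorem pvFoldA_mem (u : PvNode) (L : List PvNode) :
    ∀ (st : List PvNode × PvPrev) (x : PvNode), x ∈ st.1 → x ∈ (L.foldl (pvStepA u) st).1 := by
  induction L with
  | nil => intro st x hx; exact hx
  | cons v L ih =>
    intro st x hx
    simp only [List.foldl_cons]
    apply ih
    by_cases h : st.2.contains v = true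
    · simp [pvStepA, h]; exact hx
    · simp only [pvStepA]; rw [if_neg (by simp [h])]
      exact List.mem_append_left _ hx

theorem pvFoldA_nodup (u : PvNode) (L : List PvNode) :
    ∀ (st : List PvNode × PvPrev), st.2.keys.Nodup → (L.foldl (pvStepA u) st).2.keys.Nodup := by
  induction L with
  | nil => intro st h; exact h
  | cons v L ih =>
    intro st h
    simp only [List.foldl_cons]
    apply ih
    by_cases hc : st.2.contains v = true
    · simpa [pvStepA, hc]
    · simp only [pvStepA]; rw [if_neg (by simp [hc])]
      exact PySem.Dict.nodup_keys_insert _ _ _ h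

theorem pvFoldA_contains_new (u : PvNode) (L : List PvNode) :
    ∀ (st : List PvNode × PvPrev) (x : PvNode),
      (L.foldl (pvStepA u) st).2.contains x = true → st.2.contains x = true ∨ x ∈ (L.foldl (pvStepA u) st).1 := by
  induction L with
  | nil => intro st x h; exact Or.inl h
  | cons v L ih =>
    intro st x h
    simp only [List.foldl_cons] at h ⊢
    by_cases hc : st.2.contains v = true
    · simpa [pvStepA, hc] using ih _ x (by simpa [pvStepA, hc] using h)
    · simp only [pvStepA] at h ⊢
      rw [if_neg (by simp [hc])] at h ⊢
      rcases ih _ x h with h1 | h2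
      · simp only [PySem.Dict.contains_insert] at h1
        rcases Bool.or_eq_true_iff.mp h1 with h3 | h4
        · right
          have : x = v := by simpa using h3
          subst this
          exact pvFoldA_mem u L _ x (List.mem_append_right _ (by simp))
        · exact Or.inl h4
      · exact Or.inr h2

theorem pvFilterFresh_insert (prev : PvPrev) (v : PvNode) (w : Option PvNode)
    (hfresh : prev.contains v = false) :
    ∀ (s : List PvNode), s.Nodup → v ∈ s →
    (s.filter (fun x => !(prev.insert v w).contains x)).length + 1 =
      (s.filter (fun x => !prev.contains x)).length := by
  intro s
  induction s with
  | nil => intro _ hv; simp at hv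
  | cons a s ih =>
    intro hs hv
    have hnd := List.nodup_cons.mp hs
    by_cases hav : a = v
    · subst hav
      have hfilt : s.filter (fun x => !(prev.insert a w).contains x) =
          s.filter (fun x => !prev.contains x) := by
        refine List.filter_congr ?_
        intro x hx
        have hxa : (x == a) = false := by
          simp only [beq_eq_false_iff_ne]; intro he; subst he; exact hnd.1 hx
        rw [PySem.Dict.contains_insert, hxa, Bool.false_or]
      rw [List.filter_cons, List.filter_cons, hfilt]
      simp [PySem.Dict.contains_insert_self, hfresh]
    · have hvs : v ∈ s := by
        rcases List.mem_cons.mp hv with h1 | h2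
        · exact absurd h1.symm hav
        · exact h2
      have hca : ((prev.insert v w).contains a) = prev.contains a := by
        rw [PySem.Dict.contains_insert]
        have : (a == v) = false := by simpa using hav
        rw [this, Bool.false_or]
      rw [List.filter_cons, List.filter_cons, hca]
      by_cases hpa : prev.contains a = true
      · simp only [hpa, Bool.not_true]
        rw [if_neg (by decide), if_neg (by decide)]
        exact ih hnd.2 hvs
      · have hpa' : prev.contains a = false := by simpa using hpa
        simp only [hpa', Bool.not_false]
        rw [if_pos trivial, if_pos trivial, List.length_cons, List.length_cons, ← ih hnd.2 hvs]

theorem pvFoldA_measure (g : PvGraph) (u : PvNode) (L : List PvNode)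
    (hL : ∀ v ∈ L, v ∈ PySem.Set.ofList g.values.flatten) :
    ∀ (st : List PvNode × PvPrev),
      pvFresh g (L.foldl (pvStepA u) st).2 + (L.foldl (pvStepA u) st).1.length ≤
        pvFresh g st.2 + st.1.length := by
  induction L with
  | nil => intro st; exact le_refl _
  | cons v L ih =>
    intro st
    simp only [List.foldl_cons]
    by_cases hc : st.2.contains v = true
    · simpa [pvStepA, hc] using ih (fun x hx => hL x (List.mem_cons_of_mem _ hx)) st
    · have hc' : st.2.contains v = false := by simpa using hc
      simp only [pvStepA]; rw [if_neg (by simp [hc'])]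
      refine le_trans (ih (fun x hx => hL x (List.mem_cons_of_mem _ hx)) _) ?_
      simp only [List.length_append, List.length_cons, List.length_nil]
      have := pvFilterFresh_insert st.2 v (some u) hc' (PySem.Set.ofList g.values.flatten)
        (PySem.Set.nodup_ofList _) (hL v (by simp))
      unfold pvFresh
      omega

-- ----- the coupled inner foldl -----

theorem pvSetContains (s : PySem.Set PvNode) (x : PvNode) :
    PySem.Set.contains s x = decide (x ∈ s) := by
  rw [PySem.Set.contains_eq_listContains]; exact List.contains_eq_mem x s

theorem pvFoldCouple (g : PvGraph) (u : PvNode) (p : List PvNode)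
    (L : List PvNode) :
    ∀ (qA : List PvNode) (prev : PvPrev) (qB : List (List PvNode)) (seen : PySem.Set PvNode),
      List.Forall₂ (fun x q => PvChain prev x q ∧ q.Nodup) qA qB →
      (∀ v, PySem.Set.contains seen v = prev.contains v) →
      PvChain prev u p → p.Nodup →
      List.Forall₂ (fun x q => PvChain (L.foldl (pvStepA u) (qA, prev)).2 x q ∧ q.Nodup)
          (L.foldl (pvStepA u) (qA, prev)).1 (L.foldl (pvStepB p) (qB, seen)).1 ∧
      (∀ v, PySem.Set.contains (L.foldl (pvStepB p) (qB, seen)).2 v =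
              (L.foldl (pvStepA u) (qA, prev)).2.contains v) ∧
      PvChain (L.foldl (pvStepA u) (qA, prev)).2 u p := by
  induction L with
  | nil => intro qA prev qB seen h1 h2 h3 h4; exact ⟨h1, h2, h3⟩
  | cons v L ih =>
    intro qA prev qB seen h1 h2 h3 h4
    simp only [List.foldl_cons]
    by_cases hc : prev.contains v = true
    · have hsv : PySem.Set.contains seen v = true := by rw [h2]; exact hc
      simp only [pvStepA, pvStepB, hc, hsv, if_pos]
      exact ih qA prev qB seen h1 h2 h3 h4
    · have hc' : prev.contains v = false := by simpa using hc
      have hsv : PySem.Set.contains seen v = false := by rw [h2]; exact hc'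
      simp only [pvStepA, pvStepB]
      have hsv' : v ∉ seen := by
        simpa only [pvSetContains, decide_eq_false_iff_not] using hsv
      rw [if_neg (by simp [hc']), if_neg (by simp [hsv'])]
      have hext : PvExt prev (prev.insert v (some u)) := pvExt_insert_fresh _ _ _ hc'
      have hchain_u : PvChain (prev.insert v (some u)) u p := pvChain_mono _ _ hext _ _ h3
      have hchain_v : PvChain (prev.insert v (some u)) v (v :: p) := by
        refine PvChain.step v u p ?_ hchain_u
        exact PySem.Dict.get?_insert_self _ _ _
      have hvp : v ∉ p := by
        intro hvp
        have := pvChain_contains prev u p h3 v hvp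
        rw [this] at hc'; exact absurd hc' (by simp)
      refine ih (qA ++ [v]) (prev.insert v (some u)) (qB ++ [v :: p]) (PySem.Set.add seen v)
        ?_ ?_ hchain_u h4
      · refine List.rel_append ?_ (List.Forall₂.cons ?_ List.Forall₂.nil)
        · exact List.Forall₂.imp (fun a b hx => ⟨pvChain_mono _ _ hext _ _ hx.1, hx.2⟩) h1
        · exact ⟨hchain_v, by simp [List.nodup_cons, hvp, h4]⟩
      · intro x
        rw [PySem.Dict.contains_insert]
        by_cases hx : x = v
        · subst hx
          simp [PySem.Set.mem_add, hc']
        · have h5 : (x == v) = false := by simpa using hx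
          simp only [h5, Bool.false_or]
          rw [← h2 x]
          simp [PySem.Set.mem_add, hx]

-- ----- the coupled BFS loops -----

theorem pvCouple (g : PvGraph) (t : PvNode) :
    ∀ (fuel : Nat) (qA : List PvNode) (prev : PvPrev) (qB : List (List PvNode)) (seen : PySem.Set PvNode),
      List.Forall₂ (fun x q => PvChain prev x q ∧ q.Nodup) qA qB →
      (∀ v, PySem.Set.contains seen v = prev.contains v) →
      prev.keys.Nodup →
      (prev.contains t = true → t ∈ qA) →
      pvFresh g prev + qA.length ≤ fuel →
      match pvBfsB g t fuel qB seen with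
      | some p => (pvBfsA g t fuel qA prev).contains t = true ∧
                  PvChain (pvBfsA g t fuel qA prev) t p ∧ p.Nodup ∧
                  (pvBfsA g t fuel qA prev).keys.Nodup
      | none => (pvBfsA g t fuel qA prev).contains t = false := by
  intro fuel
  induction fuel with
  | zero =>
    intro qA prev qB seen h1 h2 hknd hqt hmeas
    have hqA : qA = [] := by
      cases qA with
      | nil => rfl
      | cons a l => simp only [List.length_cons] at hmeas; omega
    subst hqA
    have hqB : qB = [] := by cases h1; rfl
    subst hqB
    simp only [pvBfsB, pvBfsA]
    cases hct : prev.contains t with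
    | false => rfl
    | true => exact (List.not_mem_nil (hqt hct)).elim
  | succ fuel ih =>
    intro qA prev qB seen h1 h2 hknd hqt hmeas
    cases qA with
    | nil =>
      cases qB with
      | cons b qB' => cases h1
      | nil =>
        simp only [pvBfsB, pvBfsA]
        cases hct : prev.contains t with
        | false => rfl
        | true => exact (List.not_mem_nil (hqt hct)).elim
    | cons u qA' =>
      cases qB with
      | nil => cases h1
      | cons p qB' =>
        have hup : PvChain prev u p ∧ p.Nodup := (List.forall₂_cons.mp h1).1
        have hrest := (List.forall₂_cons.mp h1).2
        obtain ⟨pr, hpr⟩ := pvChain_head _ _ _ hup.1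
        have hhead : p.headD [] = u := by rw [hpr]; rfl
        simp only [pvBfsA, pvBfsB, hhead]
        by_cases hut : u = t
        · subst hut
          rw [if_pos rfl, if_pos rfl]
          refine ⟨?_, hup.1, hup.2, hknd⟩
          exact pvChain_contains prev u p hup.1 u (by rw [hpr]; exact List.mem_cons_self ..)
        · rw [if_neg hut, if_neg hut]
          obtain ⟨h1', h2', hchainu'⟩ :=
            pvFoldCouple g u p (g.getD u []) qA' prev qB' seen hrest h2 hup.1 hup.2
          have hknd' : ((g.getD u []).foldl (pvStepA u) (qA', prev)).2.keys.Nodup :=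
            pvFoldA_nodup u _ _ hknd
          have hqt' : ((g.getD u []).foldl (pvStepA u) (qA', prev)).2.contains t = true →
              t ∈ ((g.getD u []).foldl (pvStepA u) (qA', prev)).1 := by
            intro hcc
            rcases pvFoldA_contains_new u _ _ t hcc with hold | hnew
            · rcases List.mem_cons.mp (hqt hold) with he | hm
              · exact absurd he.symm hut
              · exact pvFoldA_mem u _ _ t hm
            · exact hnew
          have hLU : ∀ v ∈ g.getD u [], v ∈ PySem.Set.ofList g.values.flatten := by
            intro v hv
            rw [PySem.Set.mem_ofList]
            apply List.mem_flatten.mpr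
            refine ⟨g.getD u [], ?_, hv⟩
            cases hgu : g.contains u with
            | false =>
              rw [PySem.Dict.getD_of_not_contains _ _ hgu] at hv; cases hv
            | true =>
              rw [PySem.Dict.contains_eq_isSome_get?] at hgu
              obtain ⟨l, hl⟩ := Option.isSome_iff_exists.mp hgu
              rw [PySem.Dict.getD_of_get?_eq_some _ _ hl]
              simp only [PySem.Dict.values]
              exact List.mem_map.mpr ⟨(u, l), PySem.Dict.mem_items_of_get?_eq_some g hl, rfl⟩
          have hmeas' : pvFresh g ((g.getD u []).foldl (pvStepA u) (qA', prev)).2 +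
              ((g.getD u []).foldl (pvStepA u) (qA', prev)).1.length ≤ fuel := by
            have h7 := pvFoldA_measure g u _ hLU (qA', prev)
            dsimp only at h7
            simp only [List.length_cons] at hmeas
            omega
          exact ih _ _ _ _ h1' h2' hknd' hqt' hmeas'

-- ----- assembling the two functions -----

theorem pvMain (m n : Int) (basis : List (Int × Int)) (enter : Int × Int) :
    find_cycle_in_basis m n basis enter = find_cycle_in_basis_alt m n basis enter := by
  simp only [find_cycle_in_basis, find_cycle_in_basis_alt]
  set g := pvBuildGraph basis with hg
  set start := pvNodeR enter.1 with hstart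
  set t := pvNodeC enter.2 with ht
  set fuel := g.values.flatten.length + 2 with hfuel
  set prev0 := (PySem.Dict.empty (κ := PvNode) (ν := Option PvNode)).insert start none with hprev0
  have h1 : List.Forall₂ (fun x q => PvChain prev0 x q ∧ q.Nodup) [start] [[start]] :=
    List.Forall₂.cons
      ⟨PvChain.base start (PySem.Dict.get?_insert_self _ _ _), List.nodup_singleton _⟩
      List.Forall₂.nil
  have h2 : ∀ v, PySem.Set.contains (PySem.Set.ofList [start]) v = prev0.contains v := by
    intro v
    have hof : PySem.Set.ofList [start] = [start] :=
      PySem.Set.ofList_eq_self_of_nodup _ (List.nodup_singleton _)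
    rw [hof, pvSetContains, hprev0, PySem.Dict.contains_insert, PySem.Dict.contains_empty,
      Bool.or_false]
    by_cases hv : v = start
    · subst hv; simp
    · simp [hv]
  have hknd : prev0.keys.Nodup :=
    PySem.Dict.nodup_keys_insert _ _ _ PySem.Dict.nodup_keys_empty
  have hqt : prev0.contains t = true → t ∈ ([start] : List PvNode) := by
    intro hc
    rw [hprev0, PySem.Dict.contains_insert, PySem.Dict.contains_empty, Bool.or_false] at hc
    have hts : t = start := by simpa using hc
    simp [hts]
  have hmeas : pvFresh g prev0 + ([start] : List PvNode).length ≤ fuel := by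
    have hle1 : pvFresh g prev0 ≤ (PySem.Set.ofList g.values.flatten).length :=
      List.length_filter_le _ _
    have hle2 := PySem.Set.length_ofList_le g.values.flatten
    simp only [List.length_cons, List.length_nil, hfuel]
    omega
  have key := pvCouple g t fuel [start] prev0 [[start]] (PySem.Set.ofList [start])
    h1 h2 hknd hqt hmeas
  cases hB : pvBfsB g t fuel [[start]] (PySem.Set.ofList [start]) with
  | none =>
    rw [hB] at key
    dsimp only at key
    rw [key]
    simp
  | some p =>
    rw [hB] at key
    dsimp only at key
    obtain ⟨hct, hchain, hnodup, hkndF⟩ := key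
    have hsub : p ⊆ (pvBfsA g t fuel [start] prev0).keys := fun x hx =>
      (PySem.Dict.contains_iff_mem_keys _ _).mp
        (pvChain_contains _ _ _ hchain x hx)
    have hlen : p.length ≤ (pvBfsA g t fuel [start] prev0).keys.length :=
      List.Subperm.length_le (List.subperm_of_subset hnodup hsub)
    have hkeys : (pvBfsA g t fuel [start] prev0).keys.length =
        (pvBfsA g t fuel [start] prev0).items.length := by
      simp only [PySem.Dict.keys, List.length_map]
    have hrecon : pvReconA (pvBfsA g t fuel [start] prev0)
        ((pvBfsA g t fuel [start] prev0).items.length + 1) t = p :=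
      pvRecon_of_chain _ t p hchain _ (by omega)
    rw [if_pos hct, hrecon, pvEdgesA_eq_zip]

-- ===== VERDICT (by name: the statement is the Claim_ definition above) =====
theorem find_cycle_in_basis_spec : Claim_equal_find_cycle_in_basis := by
  intro m n basis enter _
  show _ = _
  exact pvMain m n basis enter
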